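-- pv_equiv track=rewrite | github.com/mateu/Bracket | script/parent-gen.py | generate_parent_games
-- ===== SOURCE A (Python) =====
-- def generate_parent_games(start, end):
--     """
--     Generate parent games for region rounds 2-4
--     Helps determine the seed of the winning team
--     If the winning team is the lower seed
--     then there are extra points added to the score
--     """
--     w = 0
--     for _ in range(0, 4):
--         z = 0
--         for x in range(start, end + 1):
--             for _ in range(1, 3):
--                 z = z+1
--                 yield (x+w*15, z+w*15)
--         w = w+1
-- ===== SOURCE B (Python) =====
-- def generate_parent_games(start, end):
--     """Same tuples as A: for each of the 4 regions (offset w*15), each game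
--     index in [start, end] appears twice, paired with a counter 1..2*(end-start+1).
--     Both components are derived arithmetically from a single flat index i."""
--     for w in range(0, 4):
--         base = w * 15
--         for i in range(2 * (end - start + 1)):
--             yield (start + i // 2 + base, i + 1 + base)
-- ===== Notes on version B (the rewrite author's own statement) =====
-- stated objective: simpler
-- what changed: The inner x-loop with its running counter z and the nested two-iteration loop are flattened into one arithmetic pass over a single flat index i, computing both tuple components as closed-form expressions of i instead of maintaining z as mutable state.
import Mathlib
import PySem

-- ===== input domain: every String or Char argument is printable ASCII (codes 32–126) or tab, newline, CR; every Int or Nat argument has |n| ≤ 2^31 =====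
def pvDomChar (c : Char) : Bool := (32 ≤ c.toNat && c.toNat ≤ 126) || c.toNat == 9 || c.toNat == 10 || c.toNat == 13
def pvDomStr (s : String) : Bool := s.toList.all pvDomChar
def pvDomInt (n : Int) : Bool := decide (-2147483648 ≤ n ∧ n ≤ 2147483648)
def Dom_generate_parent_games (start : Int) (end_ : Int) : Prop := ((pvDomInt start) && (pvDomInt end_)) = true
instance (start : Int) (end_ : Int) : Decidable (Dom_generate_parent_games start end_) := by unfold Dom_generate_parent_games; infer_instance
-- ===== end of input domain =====

-- B flattens A's inner x-loop + running counter z into one arithmetic pass over a flat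
-- index, deriving both tuple components in closed form (objective: simpler).

-- ===== PORT A =====
-- A: generator with outer loop w over range(4), inner x over range(start, end+1),
-- innermost _ over range(1,3) incrementing z and yielding (x+w*15, z+w*15).
def generate_parent_games (start : Int) (end_ : Int) : List (Int × Int) :=
  ((PySem.List.pyRange 0 4 1).foldl
    (fun (s : List (Int × Int) × Int) _ =>
      let w := s.2
      let inner := (PySem.List.pyRange start (end_ + 1) 1).foldl
        (fun (t : List (Int × Int) × Int) x =>
          (PySem.List.pyRange 1 3 1).foldl
            (fun (u : List (Int × Int) × Int) _ =>
              let z := u.2 + 1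
              (u.1 ++ [(x + w * 15, z + w * 15)], z))
            t)
        (s.1, 0)
      (inner.1, w + 1))
    ([], 0)).1

-- ===== PORT B =====
-- B: for w in range(4): base = w*15; for i in range(2*(end-start+1)):
--      yield (start + i//2 + base, i + 1 + base)
def generate_parent_games_alt (start : Int) (end_ : Int) : List (Int × Int) :=
  (PySem.List.pyRange 0 4 1).flatMap (fun w =>
    let base := w * 15
    (PySem.List.pyRange 0 (2 * (end_ - start + 1)) 1).map (fun i =>
      (start + PySem.Int.floordiv i 2 + base, i + 1 + base)))

-- ===== PRECONDITION & SPEC =====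
def Spec_generate_parent_games (start : Int) (end_ : Int) (out : List (Int × Int)) : Prop := out = generate_parent_games_alt start end_
instance (start : Int) (end_ : Int) (out : List (Int × Int)) : Decidable (Spec_generate_parent_games start end_ out) := by unfold Spec_generate_parent_games; infer_instance

-- ===== CLAIM (what is proved, stated in full; the proofs are below) =====
def Claim_equal_generate_parent_games : Prop := ∀ (start : Int) (end_ : Int), Dom_generate_parent_games start end_ → Spec_generate_parent_games start end_ (generate_parent_games start end_)

-- ===== LEMMAS AND PROOFS =====

-- B's inner list for one region offset w, phrased over a Nat length n.
def pvSeg (start : Int) (w : Int) (n : Nat) : List (Int × Int) :=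
  (List.range (2 * n)).map (fun (k : Nat) =>
    (start + ((k : Int)) / 2 + w * 15, ((k : Int)) + 1 + w * 15))

theorem pvSeg_eq_alt (start end_ w : Int) :
    (PySem.List.pyRange 0 (2 * (end_ - start + 1)) 1).map (fun i =>
      (start + PySem.Int.floordiv i 2 + w * 15, i + 1 + w * 15))
      = pvSeg start w (end_ + 1 - start).toNat := by
  rw [PySem.List.pyRange_one]
  have h2 : (2 * (end_ - start + 1) - 0).toNat = 2 * (end_ + 1 - start).toNat := by omega
  rw [h2, pvSeg, List.map_map]
  apply List.map_congr_left
  intro k _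
  simp [PySem.Int.floordiv, Function.comp, Int.fdiv_eq_ediv]

-- A's inner double loop (over x and the two-iteration counter loop), starting from
-- accumulator (out, 0), produces out ++ pvSeg and final counter 2*n.
theorem pvInner (start w : Int) (n : Nat) (out : List (Int × Int)) :
    (PySem.List.pyRange start (start + n) 1).foldl
        (fun (t : List (Int × Int) × Int) x =>
          (PySem.List.pyRange 1 3 1).foldl
            (fun (u : List (Int × Int) × Int) _ =>
              let z := u.2 + 1
              (u.1 ++ [(x + w * 15, z + w * 15)], z))
            t)
        (out, 0)
      = (out ++ pvSeg start w n, (2 * n : Int)) := by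
  induction n with
  | zero =>
    rw [show start + (0 : Nat) = start by simp,
        PySem.List.pyRange_one_eq_nil (le_refl start)]
    simp [pvSeg]
  | succ m ih =>
    have hsplit : PySem.List.pyRange start (start + (m + 1 : Nat)) 1
        = PySem.List.pyRange start (start + m) 1 ++ [start + m] := by
      rw [show (start + (m + 1 : Nat)) = (start + m) + 1 by push_cast; ring]
      rw [PySem.List.pyRange_one_succ_right (by omega)]
    rw [hsplit, List.foldl_append, ih]
    have h13 : PySem.List.pyRange 1 3 1 = [1, 2] := by decide
    rw [h13]
    simp only [List.foldl]
    have hseg : pvSeg start w (m + 1)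
        = pvSeg start w m
          ++ [(start + m + w * 15, 2 * (m : Int) + 1 + w * 15),
              (start + m + w * 15, 2 * (m : Int) + 2 + w * 15)] := by
      unfold pvSeg
      rw [show 2 * (m + 1) = (2 * m + 1) + 1 by ring,
          List.range_succ, List.range_succ]
      simp only [List.map_append, List.map_cons, List.map_nil, List.append_assoc,
        List.append_cancel_left_eq]
      push_cast
      have d1 : 2 * (m : Int) / 2 = m := by omega
      have d2 : (2 * (m : Int) + 1) / 2 = m := by omega
      rw [d1, d2]
      norm_num
      omega
    rw [hseg]
    simp only [Prod.mk.injEq, List.append_assoc, List.cons_append, List.nil_append]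
    refine ⟨rfl, by push_cast; ring⟩

-- When end+1 < start both ranges are empty; otherwise end_+1 = start + n.
theorem pvInner' (start end_ w : Int) (out : List (Int × Int)) :
    (PySem.List.pyRange start (end_ + 1) 1).foldl
        (fun (t : List (Int × Int) × Int) x =>
          (PySem.List.pyRange 1 3 1).foldl
            (fun (u : List (Int × Int) × Int) _ =>
              let z := u.2 + 1
              (u.1 ++ [(x + w * 15, z + w * 15)], z))
            t)
        (out, 0)
      = (out ++ pvSeg start w (end_ + 1 - start).toNat,
         (2 * (end_ + 1 - start).toNat : Int)) := by
  by_cases h : start ≤ end_ + 1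
  · have hb : end_ + 1 = start + ((end_ + 1 - start).toNat : Int) := by omega
    have := pvInner start w (end_ + 1 - start).toNat out
    rw [← hb] at this
    exact this
  · rw [PySem.List.pyRange_one_eq_nil (by omega : end_ + 1 ≤ start)]
    have h0 : (end_ + 1 - start).toNat = 0 := by omega
    simp [h0, pvSeg]

-- ===== VERDICT (by name: the statement is the Claim_ definition above) =====
theorem generate_parent_games_spec : Claim_equal_generate_parent_games := by
  intro start end_ _
  unfold Spec_generate_parent_games generate_parent_games generate_parent_games_alt
  have h04 : PySem.List.pyRange 0 4 1 = [0, 1, 2, 3] := by decide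
  rw [h04]
  simp only [List.foldl, List.flatMap_cons, List.flatMap_nil, List.append_nil,
    pvSeg_eq_alt, pvInner']
  simp
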